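-- pv_equiv track=rewrite | github.com/mindspore-ai/hyper-parallel | hyper_parallel/platform/torch/group_utils.py | _build_groups_for_blocks
-- ===== SOURCE A (Python) =====
-- from typing import Dict, List, Tuple, Union
--
-- def _build_groups_for_blocks(
--     group_starts: List[int],
--     block_size: int,
--     template_span_int: int,
--     normalized_template: List[int],
--     template_len: int,
--     world_size: int,
-- ) -> List[List[int]]:
--     """Build all groups from block starts."""
--     all_groups = []
--     for start_block in group_starts:
--         max_offset = block_size - template_span_int
--         for offset in range(0, max_offset):
--             group = [start_block + offset + normalized_template[i] for i in range(template_len)]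
--             if all(0 <= r < world_size for r in group):
--                 all_groups.append(group)
--     return all_groups
-- ===== SOURCE B (Python) =====
-- def _build_groups_for_blocks(
--     group_starts,
--     block_size,
--     template_span_int,
--     normalized_template,
--     template_len,
--     world_size,
-- ):
--     """Build all groups from block starts, constructing only surviving groups.
--
--     Compute the template's min/max once, derive the closed-form valid offset
--     interval per start, and materialize only the groups inside it.
--     """
--     max_offset = block_size - template_span_int
--     if max_offset <= 0 or not group_starts:
--         return []
--     tmpl = normalized_template[:template_len] if template_len > 0 else []
--     if not tmpl:
--         return [[] for _ in group_starts for _ in range(max_offset)]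
--     nlo = -min(tmpl)
--     nhi = world_size - max(tmpl)
--     all_groups = []
--     append = all_groups.append
--     for start in group_starts:
--         lo = nlo - start
--         if lo < 0:
--             lo = 0
--         hi = nhi - start
--         if hi > max_offset:
--             hi = max_offset
--         for offset in range(lo, hi):
--             base = start + offset
--             append([base + t for t in tmpl])
--     return all_groups
-- ===== Notes on version B (the rewrite author's own statement) =====
-- stated objective: faster
-- what changed: Instead of building every candidate group and testing each rank, B computes the template's min/max once, derives the closed-form valid offset interval [lo,hi) per start, and materializes only the surviving groups; intended as faster (skips failing offsets entirely) - measured 2.7x at the largest size both finished.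
import Mathlib
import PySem

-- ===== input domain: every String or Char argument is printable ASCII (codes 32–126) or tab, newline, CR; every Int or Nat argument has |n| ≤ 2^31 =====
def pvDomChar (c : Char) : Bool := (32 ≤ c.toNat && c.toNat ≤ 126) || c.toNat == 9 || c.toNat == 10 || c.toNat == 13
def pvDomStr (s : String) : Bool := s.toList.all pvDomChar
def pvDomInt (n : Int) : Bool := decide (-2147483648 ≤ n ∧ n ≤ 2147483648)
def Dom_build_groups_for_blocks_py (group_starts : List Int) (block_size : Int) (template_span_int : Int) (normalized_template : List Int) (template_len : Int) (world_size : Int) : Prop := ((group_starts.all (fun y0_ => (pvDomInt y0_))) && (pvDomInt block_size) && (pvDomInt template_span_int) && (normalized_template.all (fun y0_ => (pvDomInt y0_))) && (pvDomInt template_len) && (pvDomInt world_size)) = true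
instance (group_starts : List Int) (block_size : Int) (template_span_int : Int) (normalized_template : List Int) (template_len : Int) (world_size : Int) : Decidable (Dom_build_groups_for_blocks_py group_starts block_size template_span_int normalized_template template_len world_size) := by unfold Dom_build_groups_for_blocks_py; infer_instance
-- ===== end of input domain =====

-- B replaces the per-offset, per-rank bounds test with a closed-form valid offset interval
-- derived from the template's min/max computed once, constructing only the surviving groups
-- (intended as faster; a timing run measured ~2.7x at the largest size both finished).

-- ===== PORT A =====
def build_groups_for_blocks_py (group_starts : List Int) (block_size : Int) (template_span_int : Int) (normalized_template : List Int) (template_len : Int) (world_size : Int) : List (List Int) :=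
  group_starts.foldl (fun all_groups start_block =>
    let max_offset := block_size - template_span_int
    (PySem.List.pyRange 0 max_offset 1).foldl (fun acc offset =>
      let group := (PySem.List.pyRange 0 template_len 1).map
        (fun i => start_block + offset + PySem.List.pyGetD normalized_template i 0)
      if group.all (fun r => decide (0 ≤ r) && decide (r < world_size)) then acc ++ [group] else acc)
      all_groups) []

-- ===== PORT B =====
-- loop body of B: valid offset interval for one start (bounds arithmetic hoisted by the caller)
def pvBlockB (tmpl : List Int) (nlo nhi max_offset start : Int) : List (List Int) :=
  let lo := if nlo - start < 0 then 0 else nlo - start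
  let hi := if nhi - start > max_offset then max_offset else nhi - start
  (PySem.List.pyRange lo hi 1).map (fun offset => tmpl.map (fun t => start + offset + t))

def build_groups_for_blocks_py_alt (group_starts : List Int) (block_size : Int) (template_span_int : Int) (normalized_template : List Int) (template_len : Int) (world_size : Int) : List (List Int) :=
  let max_offset := block_size - template_span_int
  if max_offset ≤ 0 ∨ group_starts = [] then []
  else
    let tmpl : List Int := if 0 < template_len then PySem.List.slice normalized_template none (some template_len) else []
    match tmpl with
    | [] => group_starts.flatMap (fun _ => (PySem.List.pyRange 0 max_offset 1).map (fun _ => ([] : List Int)))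
    | x :: rest =>
      let nlo := -(rest.foldl min x)
      let nhi := world_size - rest.foldl max x
      group_starts.foldl (fun all_groups start =>
        all_groups ++ pvBlockB (x :: rest) nlo nhi max_offset start) []

-- ===== PRECONDITION & SPEC =====
-- Pre_ excludes exactly the inputs on which A raises IndexError: template_len exceeds the
-- template list's length while the loops actually run (some start and a positive offset range).
def Pre_build_groups_for_blocks_py (group_starts : List Int) (block_size : Int) (template_span_int : Int) (normalized_template : List Int) (template_len : Int) (world_size : Int) : Prop :=
  template_len ≤ (normalized_template.length : Int) ∨ group_starts = [] ∨ block_size - template_span_int ≤ 0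
instance (group_starts : List Int) (block_size : Int) (template_span_int : Int) (normalized_template : List Int) (template_len : Int) (world_size : Int) : Decidable (Pre_build_groups_for_blocks_py group_starts block_size template_span_int normalized_template template_len world_size) := by unfold Pre_build_groups_for_blocks_py; infer_instance
def pvWitness_build_groups_for_blocks_py : List Int × Int × Int × List Int × Int × Int := ([0, 2], 4, 1, [0, 1], 2, 6)

def Spec_build_groups_for_blocks_py (group_starts : List Int) (block_size : Int) (template_span_int : Int) (normalized_template : List Int) (template_len : Int) (world_size : Int) (out : List (List Int)) : Prop := out = build_groups_for_blocks_py_alt group_starts block_size template_span_int normalized_template template_len world_size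
instance (group_starts : List Int) (block_size : Int) (template_span_int : Int) (normalized_template : List Int) (template_len : Int) (world_size : Int) (out : List (List Int)) : Decidable (Spec_build_groups_for_blocks_py group_starts block_size template_span_int normalized_template template_len world_size out) := by unfold Spec_build_groups_for_blocks_py; infer_instance

-- ===== CLAIM (what is proved, stated in full; the proofs are below) =====
def Claim_equal_build_groups_for_blocks_py : Prop := ∀ (group_starts : List Int) (block_size : Int) (template_span_int : Int) (normalized_template : List Int) (template_len : Int) (world_size : Int), Dom_build_groups_for_blocks_py group_starts block_size template_span_int normalized_template template_len world_size → Pre_build_groups_for_blocks_py group_starts block_size template_span_int normalized_template template_len world_size → Spec_build_groups_for_blocks_py group_starts block_size template_span_int normalized_template template_len world_size (build_groups_for_blocks_py group_starts block_size template_span_int normalized_template template_len world_size)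

-- ===== LEMMAS AND PROOFS =====

-- A conditional-append fold over an offset range, when the condition is an interval test,
-- collapses to mapping over the clipped interval.
theorem foldl_if_interval {α : Type} (g : Int → α) (lo hi : Int) :
    ∀ (n : Nat) (a b : Int), (b - a).toNat = n → ∀ (acc : List α),
    (PySem.List.pyRange a b 1).foldl
      (fun ac o => if lo ≤ o ∧ o < hi then ac ++ [g o] else ac) acc
    = acc ++ (PySem.List.pyRange (max a lo) (min b hi) 1).map g := by
  intro n
  induction n with
  | zero =>
    intro a b h acc
    rw [PySem.List.pyRange_one_eq_nil (by omega),
        PySem.List.pyRange_one_eq_nil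
          (le_trans (le_trans (min_le_left b hi) (by omega)) (le_max_left a lo))]
    simp
  | succ k ih =>
    intro a b h acc
    rw [PySem.List.pyRange_one_cons (by omega)]
    simp only [List.foldl_cons]
    rw [ih (a + 1) b (by omega)]
    by_cases hc : lo ≤ a ∧ a < hi
    · rw [if_pos hc]
      have h1 : max a lo = a := max_eq_left hc.1
      have h2 : max (a + 1) lo = a + 1 := max_eq_left (by omega)
      rw [h1, h2,
          show PySem.List.pyRange a (min b hi) 1 = a :: PySem.List.pyRange (a + 1) (min b hi) 1 from
            PySem.List.pyRange_one_cons (lt_min (by omega) hc.2)]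
      simp
    · rw [if_neg hc]
      rcases not_and_or.mp hc with h1 | h1
      · have e1 : max a lo = lo := max_eq_right (by omega)
        have e2 : max (a + 1) lo = lo := max_eq_right (by omega)
        rw [e1, e2]
      · rw [PySem.List.pyRange_one_eq_nil
              (le_trans (le_trans (min_le_right b hi) (by omega)) (le_max_left a lo)),
            PySem.List.pyRange_one_eq_nil
              (le_trans (le_trans (min_le_right b hi) (by omega)) (le_max_left (a + 1) lo))]

-- A's index comprehension over range(template_len) is the take-prefix of the template.
theorem range_pyGetD_take (nt : List Int) (tl : Int) (h1 : tl ≤ (nt.length : Int)) :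
    (PySem.List.pyRange 0 tl 1).map (fun i => PySem.List.pyGetD nt i 0) = nt.take tl.toNat := by
  apply List.ext_getElem
  · simp [PySem.List.length_pyRange_one]; omega
  · intro k hk1 hk2
    have hklt : k < tl.toNat := by
      simpa [PySem.List.length_pyRange_one] using hk1
    have hkl : k < nt.length := by omega
    simp only [List.getElem_map, PySem.List.getElem_pyRange_one, List.getElem_take]
    rw [show ((0 : Int) + k) = ((k : Nat) : Int) by omega, PySem.List.pyGetD_natCast]
    exact List.getD_eq_getElem nt 0 hkl

-- The all-in-bounds test on a group is an interval test on the offset.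
theorem all_iff_interval (x : Int) (rest : List Int) (s off ws : Int) :
    (((x :: rest).map (fun t => s + off + t)).all
        (fun r => decide (0 ≤ r) && decide (r < ws)) = true)
    ↔ ((-s - rest.foldl min x) ≤ off ∧ off < ws - rest.foldl max x - s) := by
  simp only [List.all_eq_true, List.mem_map, Bool.and_eq_true, decide_eq_true_eq]
  constructor
  · intro h
    have hminmem := PySem.List.foldl_min_mem rest x
    have hMmem := PySem.List.foldl_max_mem rest x
    have hm : 0 ≤ s + off + rest.foldl min x ∧ s + off + rest.foldl min x < ws := by
      apply h; rcases hminmem with h' | h'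
      · exact ⟨x, List.mem_cons_self .., by rw [h']⟩
      · exact ⟨rest.foldl min x, List.mem_cons_of_mem _ h', rfl⟩
    have hM : 0 ≤ s + off + rest.foldl max x ∧ s + off + rest.foldl max x < ws := by
      apply h; rcases hMmem with h' | h'
      · exact ⟨x, List.mem_cons_self .., by rw [h']⟩
      · exact ⟨rest.foldl max x, List.mem_cons_of_mem _ h', rfl⟩
    omega
  · rintro ⟨hlo, hhi⟩ r ⟨t, ht, rfl⟩
    have hmin := PySem.List.foldl_min_le rest x
    have hmax := PySem.List.le_foldl_max rest x
    rcases List.mem_cons.mp ht with rfl | ht'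
    · have := hmin.1; have := hmax.1; omega
    · have := hmin.2 t ht'; have := hmax.2 t ht'; omega

-- Per-start inner loop of A equals B's per-start block (nonempty template prefix).
theorem inner_eq (nt : List Int) (tl maxoff ws s x : Int) (rest : List Int)
    (hlen : tl ≤ (nt.length : Int))
    (htmpl : (if 0 < tl then PySem.List.slice nt none (some tl) else []) = x :: rest)
    (acc : List (List Int)) :
    (PySem.List.pyRange 0 maxoff 1).foldl (fun ac offset =>
      let group := (PySem.List.pyRange 0 tl 1).map
        (fun i => s + offset + PySem.List.pyGetD nt i 0)
      if group.all (fun r => decide (0 ≤ r) && decide (r < ws)) then ac ++ [group] else ac) acc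
    = acc ++ pvBlockB (x :: rest) (-(rest.foldl min x)) (ws - rest.foldl max x) maxoff s := by
  by_cases htl : 0 < tl
  · rw [if_pos htl, PySem.List.slice_to _ (by omega)] at htmpl
    have hgrp : ∀ offset : Int,
        (PySem.List.pyRange 0 tl 1).map (fun i => s + offset + PySem.List.pyGetD nt i 0)
        = (x :: rest).map (fun t => s + offset + t) := by
      intro offset
      have h2 : (PySem.List.pyRange 0 tl 1).map (fun i => s + offset + PySem.List.pyGetD nt i 0)
          = ((PySem.List.pyRange 0 tl 1).map (fun i => PySem.List.pyGetD nt i 0)).map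
              (fun t => s + offset + t) := by
        rw [List.map_map]; rfl
      rw [h2, range_pyGetD_take nt tl hlen, htmpl]
    simp only [hgrp]
    have hstep : (fun (ac : List (List Int)) (offset : Int) =>
          if ((x :: rest).map (fun t => s + offset + t)).all
              (fun r => decide (0 ≤ r) && decide (r < ws)) then
            ac ++ [(x :: rest).map (fun t => s + offset + t)] else ac)
        = (fun ac offset =>
          if (-s - rest.foldl min x) ≤ offset ∧ offset < ws - rest.foldl max x - s then
            ac ++ [(x :: rest).map (fun t => s + offset + t)] else ac) := by
      funext ac offset
      by_cases h : (-s - rest.foldl min x) ≤ offset ∧ offset < ws - rest.foldl max x - s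
      · rw [if_pos h, if_pos ((all_iff_interval x rest s offset ws).mpr h)]
      · rw [if_neg h, if_neg (fun hb => h ((all_iff_interval x rest s offset ws).mp hb))]
    rw [hstep, foldl_if_interval _ _ _ (maxoff - 0).toNat 0 maxoff rfl acc]
    unfold pvBlockB
    have hlo : (if -(rest.foldl min x) - s < 0 then (0 : Int) else -(rest.foldl min x) - s)
        = max 0 (-s - rest.foldl min x) := by
      rw [max_def]; split_ifs <;> omega
    have hhi : (if ws - rest.foldl max x - s > maxoff then maxoff else ws - rest.foldl max x - s)
        = min maxoff (ws - rest.foldl max x - s) := by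
      rw [min_def]; split_ifs <;> omega
    rw [hlo, hhi]
  · rw [if_neg htl] at htmpl; exact absurd htmpl (by simp)

-- helper: a fold whose step ignores the element keeps the accumulator
theorem foldl_id {α β : Type} (l : List β) (acc : α) :
    l.foldl (fun a _ => a) acc = acc := by
  induction l generalizing acc with
  | nil => rfl
  | cons h t ih => exact ih acc

-- ===== VERDICT (by name: the statement is the Claim_ definition above) =====
theorem build_groups_for_blocks_py_spec : Claim_equal_build_groups_for_blocks_py := by
  intro gs bs ts nt tl ws _ hpre
  unfold Spec_build_groups_for_blocks_py build_groups_for_blocks_py build_groups_for_blocks_py_alt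
  by_cases hdeg : bs - ts ≤ 0 ∨ gs = []
  · rw [if_pos hdeg]
    rcases hdeg with hmax | hnil
    · calc (gs.foldl (fun all_groups start_block =>
              (PySem.List.pyRange 0 (bs - ts) 1).foldl (fun ac offset =>
                let group := (PySem.List.pyRange 0 tl 1).map
                  (fun i => start_block + offset + PySem.List.pyGetD nt i 0)
                if group.all (fun r => decide (0 ≤ r) && decide (r < ws)) then ac ++ [group] else ac)
                all_groups) ([] : List (List Int)))
          = gs.foldl (fun a _ => a) [] := by
            congr 1; funext acc s
            rw [show PySem.List.pyRange 0 (bs - ts) 1 = [] from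
                  PySem.List.pyRange_one_eq_nil (by omega)]
            rfl
        _ = [] := foldl_id gs []
    · subst hnil; rfl
  · rw [if_neg hdeg]
    have hlen : tl ≤ (nt.length : Int) := by
      rcases hpre with h | h | h
      · exact h
      · exact absurd (Or.inr h) hdeg
      · exact absurd (Or.inl h) hdeg
    rcases htmpl : (if 0 < tl then PySem.List.slice nt none (some tl) else []) with _ | ⟨x, rest⟩
    · -- empty template prefix: every offset survives with the empty group
      have htl : ¬ 0 < tl := by
        intro htl
        rw [if_pos htl, PySem.List.slice_to _ (by omega)] at htmpl
        have hlen0 : min tl.toNat nt.length = 0 := by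
          simpa using congrArg List.length htmpl
        omega
      have hrange : PySem.List.pyRange 0 tl 1 = [] := PySem.List.pyRange_one_eq_nil (by omega)
      simp only [hrange, List.map_nil, List.all_nil, if_true]
      calc (gs.foldl (fun all_groups _ =>
              (PySem.List.pyRange 0 (bs - ts) 1).foldl
                (fun ac _ => ac ++ [([] : List Int)]) all_groups) ([] : List (List Int)))
          = gs.foldl (fun all_groups _ =>
              all_groups ++ (PySem.List.pyRange 0 (bs - ts) 1).map (fun _ => ([] : List Int))) [] := by
            congr 1; funext acc s
            rw [PySem.List.foldl_append_singleton_eq_map]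
        _ = [] ++ gs.flatMap (fun _ =>
              (PySem.List.pyRange 0 (bs - ts) 1).map (fun _ => ([] : List Int))) :=
            PySem.List.foldl_append_eq_flatMap ..
        _ = gs.flatMap (fun _ =>
              (PySem.List.pyRange 0 (bs - ts) 1).map (fun _ => ([] : List Int))) := by simp
    · congr 1
      funext acc s
      exact inner_eq nt tl (bs - ts) ws s x rest hlen htmpl acc
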